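-- pv_equiv track=rewrite | github.com/rafaella-buzatu/GENALM_Finetune_regElem | utils/attention.py | get_indices_of_high_value_subsets
-- ===== SOURCE A (Python) =====
-- def get_indices_of_high_value_subsets(lst, threshold):
--
--     #Subset the heatmap to only get the indices of the regions where the attention score is > threshold.
--     subsets_indices = []
--     subset = []
--
--     for index, value in enumerate(lst):
--         if value > threshold:
--             subset.append(index)
--         elif len(subset) >= 3:
--             subsets_indices.append(subset)
--             subset = []
--         else:
--             subset = []
--
--     if len(subset) >= 3:
--         subsets_indices.append(subset)
--
--     return subsets_indices
-- ===== SOURCE B (Python) =====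
-- def get_indices_of_high_value_subsets(lst, threshold):
--     # Two-pointer run scan: find each maximal run of values > threshold,
--     # emit its index range when the run is at least 3 long.
--     subsets_indices = []
--     n = len(lst)
--     i = 0
--     while i < n:
--         if lst[i] > threshold:
--             j = i + 1
--             while j < n and lst[j] > threshold:
--                 j += 1
--             if j - i >= 3:
--                 subsets_indices.append(list(range(i, j)))
--             i = j
--         else:
--             i += 1
--     return subsets_indices
-- ===== Notes on version B (the rewrite author's own statement) =====
-- stated objective: alternative
-- what changed: Replaces the flush-on-transition state machine (pending 'subset' list mutated per element, flushed on a low value or at the end) with a two-pointer scan that locates each maximal run of values > threshold and emits list(range(i, j)) directly, with no pending-run accumulator or trailing flush.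
import Mathlib
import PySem

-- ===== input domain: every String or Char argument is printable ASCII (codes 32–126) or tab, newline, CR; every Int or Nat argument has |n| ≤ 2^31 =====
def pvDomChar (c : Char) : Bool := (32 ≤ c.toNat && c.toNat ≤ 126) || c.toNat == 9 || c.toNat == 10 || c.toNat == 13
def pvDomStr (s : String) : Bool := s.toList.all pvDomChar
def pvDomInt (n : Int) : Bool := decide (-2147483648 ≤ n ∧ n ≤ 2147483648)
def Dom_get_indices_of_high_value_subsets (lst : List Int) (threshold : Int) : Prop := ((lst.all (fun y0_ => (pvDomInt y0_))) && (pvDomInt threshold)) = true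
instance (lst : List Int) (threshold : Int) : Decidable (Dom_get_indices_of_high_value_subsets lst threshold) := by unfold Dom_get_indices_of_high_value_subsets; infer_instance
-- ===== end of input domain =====

-- B replaces A's flush-on-transition state machine with a two-pointer maximal-run scan
-- that emits range(i, j) for each run of length >= 3 (alternative algorithm, same O(n) cost).


-- ===== PORT A =====
-- A's loop body: append the index on a high value, otherwise flush the pending run
-- (kept when it has length >= 3) and reset it.
def pvStepA (threshold : Int) (st : List (List Int) × List Int) (p : Int × Int) :
    List (List Int) × List Int :=
  if p.2 > threshold then (st.1, st.2 ++ [p.1])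
  else if 3 ≤ st.2.length then (st.1 ++ [st.2], [])
  else (st.1, [])

def get_indices_of_high_value_subsets (lst : List Int) (threshold : Int) : List (List Int) :=
  let st := (PySem.List.enumerate lst 0).foldl (pvStepA threshold) ([], [])
  if 3 ≤ st.2.length then st.1 ++ [st.2] else st.1

-- ===== PORT B =====
-- inner while loop of Source B: advance j while j < n and lst[j] > threshold.
-- (j is always a valid non-negative index when read, so List.getD is exact for lst[j].)
def pvFindRunEnd (lst : List Int) (threshold : Int) (j : Nat) : Nat :=
  if j < lst.length ∧ lst.getD j 0 > threshold then pvFindRunEnd lst threshold (j + 1) else j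
  termination_by lst.length - j
  decreasing_by omega

theorem pvFindRunEnd_ge (lst : List Int) (threshold : Int) (j : Nat) :
    j ≤ pvFindRunEnd lst threshold j := by
  induction j using pvFindRunEnd.induct lst threshold with
  | case1 j h ih => rw [pvFindRunEnd, if_pos h]; omega
  | case2 j h => rw [pvFindRunEnd, if_neg h]

-- outer while loop of Source B (i is always a valid index when read).
def pvScan (lst : List Int) (threshold : Int) (i : Nat) (acc : List (List Int)) :
    List (List Int) :=
  if i < lst.length then
    if lst.getD i 0 > threshold then
      let j := pvFindRunEnd lst threshold (i + 1)
      let acc' := if 3 ≤ j - i then acc ++ [PySem.List.pyRange (i : Int) (j : Int) 1] else acc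
      pvScan lst threshold j acc'
    else pvScan lst threshold (i + 1) acc
  else acc
  termination_by lst.length - i
  decreasing_by
  · have := pvFindRunEnd_ge lst threshold (i + 1); omega
  · omega

def get_indices_of_high_value_subsets_alt (lst : List Int) (threshold : Int) : List (List Int) :=
  pvScan lst threshold 0 []

-- ===== PRECONDITION & SPEC =====
def Spec_get_indices_of_high_value_subsets (lst : List Int) (threshold : Int) (out : List (List Int)) : Prop := out = get_indices_of_high_value_subsets_alt lst threshold
instance (lst : List Int) (threshold : Int) (out : List (List Int)) : Decidable (Spec_get_indices_of_high_value_subsets lst threshold out) := by unfold Spec_get_indices_of_high_value_subsets; infer_instance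

-- ===== CLAIM (what is proved, stated in full; the proofs are below) =====
def Claim_equal_get_indices_of_high_value_subsets : Prop := ∀ (lst : List Int) (threshold : Int), Dom_get_indices_of_high_value_subsets lst threshold → Spec_get_indices_of_high_value_subsets lst threshold (get_indices_of_high_value_subsets lst threshold)

-- ===== LEMMAS AND PROOFS =====

-- A's final flush, applied to the loop state.
def pvFinish (st : List (List Int) × List Int) : List (List Int) :=
  if 3 ≤ st.2.length then st.1 ++ [st.2] else st.1

-- case-split unfoldings of pvScan
theorem pvScan_stop (lst : List Int) (threshold : Int) (i : Nat) (acc : List (List Int))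
    (h : ¬ i < lst.length) : pvScan lst threshold i acc = acc := by
  rw [pvScan]; simp [h]

theorem pvScan_low (lst : List Int) (threshold : Int) (i : Nat) (acc : List (List Int))
    (h : i < lst.length) (hv : ¬ lst.getD i 0 > threshold) :
    pvScan lst threshold i acc = pvScan lst threshold (i + 1) acc := by
  rw [pvScan, if_pos h, if_neg hv]

theorem pvScan_high (lst : List Int) (threshold : Int) (i : Nat) (acc : List (List Int))
    (h : i < lst.length) (hv : lst.getD i 0 > threshold) :
    pvScan lst threshold i acc
      = pvScan lst threshold (pvFindRunEnd lst threshold (i + 1))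
          (if 3 ≤ pvFindRunEnd lst threshold (i + 1) - i then
            acc ++ [PySem.List.pyRange (i : Int) ((pvFindRunEnd lst threshold (i + 1)) : Int) 1]
          else acc) := by
  rw [pvScan, if_pos h, if_pos hv]

theorem pvFindRunEnd_le (lst : List Int) (threshold : Int) (j : Nat) (hj : j ≤ lst.length) :
    pvFindRunEnd lst threshold j ≤ lst.length := by
  induction j using pvFindRunEnd.induct lst threshold with
  | case1 j h ih => rw [pvFindRunEnd, if_pos h]; exact ih (by omega)
  | case2 j h => rw [pvFindRunEnd, if_neg h]; exact hj

theorem pvFindRunEnd_mem (lst : List Int) (threshold : Int) (j : Nat) :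
    ∀ m, j ≤ m → m < pvFindRunEnd lst threshold j → lst.getD m 0 > threshold := by
  induction j using pvFindRunEnd.induct lst threshold with
  | case1 j h ih =>
      intro m hm1 hm2
      rcases Nat.eq_or_lt_of_le hm1 with rfl | h'
      · exact h.2
      · exact ih m h' (by rwa [pvFindRunEnd, if_pos h] at hm2)
  | case2 j h =>
      intro m hm1 hm2
      rw [pvFindRunEnd, if_neg h] at hm2; omega

theorem pvFindRunEnd_stop (lst : List Int) (threshold : Int) (j : Nat) :
    ¬ (pvFindRunEnd lst threshold j < lst.length ∧
        lst.getD (pvFindRunEnd lst threshold j) 0 > threshold) := by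
  induction j using pvFindRunEnd.induct lst threshold with
  | case1 j h ih => rwa [pvFindRunEnd, if_pos h]
  | case2 j h => rwa [pvFindRunEnd, if_neg h]

-- one element of the enumeration, exposed at position k
theorem pvDropEnum (lst : List Int) (k : Nat) (hk : k < lst.length) :
    (PySem.List.enumerate lst 0).drop k
      = ((k : Int), lst.getD k 0) :: (PySem.List.enumerate lst 0).drop (k + 1) := by
  have hk' : k < (PySem.List.enumerate lst 0).length := by
    rw [PySem.List.length_enumerate]; exact hk
  rw [List.drop_eq_getElem_cons hk', PySem.List.getElem_enumerate]
  simp [List.getD, List.getElem?_eq_getElem hk]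

-- the fold consumes a run [k, j) of high values by appending its indices
theorem pvFoldRun (lst : List Int) (threshold : Int) (j k : Nat) (hk : k ≤ j)
    (hjn : j ≤ lst.length)
    (hrun : ∀ m, k ≤ m → m < j → lst.getD m 0 > threshold)
    (acc : List (List Int)) (c : List Int) :
    ((PySem.List.enumerate lst 0).drop k).foldl (pvStepA threshold) (acc, c)
      = ((PySem.List.enumerate lst 0).drop j).foldl (pvStepA threshold)
          (acc, c ++ PySem.List.pyRange (k : Int) (j : Int) 1) := by
  rcases Nat.eq_or_lt_of_le hk with rfl | hlt
  · simp [PySem.List.pyRange_one_eq_nil]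
  · have hkn : k < lst.length := by omega
    rw [pvDropEnum lst k hkn, List.foldl_cons]
    have hval := hrun k (le_refl _) hlt
    have hstep : pvStepA threshold (acc, c) ((k : Int), lst.getD k 0) = (acc, c ++ [(k : Int)]) := by
      simp only [pvStepA]
      rw [if_pos hval]
    rw [hstep,
      pvFoldRun lst threshold j (k + 1) (by omega) hjn
        (fun m h1 h2 => hrun m (by omega) h2) acc (c ++ [(k : Int)])]
    rw [PySem.List.pyRange_one_cons (show (k : Int) < (j : Int) by exact_mod_cast hlt)]
    push_cast
    simp
  termination_by j - k

-- main loop correspondence: A's fold over the suffix from k, plus trailing flush = B's scan from k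
theorem pvMain (lst : List Int) (threshold : Int) (k : Nat) (acc : List (List Int)) :
    pvFinish (((PySem.List.enumerate lst 0).drop k).foldl (pvStepA threshold) (acc, []))
      = pvScan lst threshold k acc := by
  by_cases hk : k < lst.length
  · by_cases hv : lst.getD k 0 > threshold
    · have hj1 : k + 1 ≤ pvFindRunEnd lst threshold (k + 1) := pvFindRunEnd_ge lst threshold (k + 1)
      set j := pvFindRunEnd lst threshold (k + 1) with hjdef
      have hjn : j ≤ lst.length := pvFindRunEnd_le lst threshold (k + 1) (by omega)
      have hrun : ∀ m, k ≤ m → m < j → lst.getD m 0 > threshold := by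
        intro m h1 h2
        rcases Nat.eq_or_lt_of_le h1 with rfl | h1'
        · exact hv
        · exact pvFindRunEnd_mem lst threshold (k + 1) m (by omega) h2
      have hstop := pvFindRunEnd_stop lst threshold (k + 1)
      rw [← hjdef] at hstop
      have hlen : (PySem.List.pyRange (k : Int) (j : Int) 1).length = j - k := by
        rw [PySem.List.length_pyRange_one]; omega
      rw [pvFoldRun lst threshold j k (by omega) hjn hrun acc []]
      simp only [List.nil_append]
      conv_rhs => rw [pvScan_high lst threshold k acc hk hv, ← hjdef]
      by_cases hjlt : j < lst.length
      · have hjv : ¬ lst.getD j 0 > threshold := fun h => hstop ⟨hjlt, h⟩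
        rw [pvDropEnum lst j hjlt, List.foldl_cons]
        have hstep : pvStepA threshold (acc, PySem.List.pyRange (k : Int) (j : Int) 1)
            ((j : Int), lst.getD j 0)
            = ((if 3 ≤ j - k then acc ++ [PySem.List.pyRange (k : Int) (j : Int) 1] else acc),
                []) := by
          simp only [pvStepA, hlen]
          rw [if_neg hjv]
          split <;> rfl
        rw [hstep, pvMain lst threshold (j + 1) _]
        rw [pvScan_low lst threshold j _ hjlt hjv]
      · have hdrop : (PySem.List.enumerate lst 0).drop j = [] := by
          apply List.drop_eq_nil_of_le; rw [PySem.List.length_enumerate]; omega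
        rw [hdrop]
        simp only [List.foldl_nil]
        rw [pvScan_stop lst threshold j _ hjlt]
        simp only [pvFinish, hlen]
    · rw [pvDropEnum lst k hk, List.foldl_cons]
      have hstep : pvStepA threshold (acc, []) ((k : Int), lst.getD k 0) = (acc, []) := by
        simp only [pvStepA]
        rw [if_neg hv]
        simp
      rw [hstep, pvMain lst threshold (k + 1) acc]
      rw [pvScan_low lst threshold k acc hk hv]
  · have hdrop : (PySem.List.enumerate lst 0).drop k = [] := by
      apply List.drop_eq_nil_of_le; rw [PySem.List.length_enumerate]; omega
    rw [hdrop, pvScan_stop lst threshold k acc hk]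
    simp [pvFinish]
  termination_by lst.length - k
  decreasing_by all_goals omega

-- ===== VERDICT (by name: the statement is the Claim_ definition above) =====
theorem get_indices_of_high_value_subsets_spec : Claim_equal_get_indices_of_high_value_subsets := by
  intro lst threshold _
  unfold Spec_get_indices_of_high_value_subsets get_indices_of_high_value_subsets
    get_indices_of_high_value_subsets_alt
  have := pvMain lst threshold 0 []
  simpa [pvFinish] using this
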